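-- pv_equiv track=rewrite | github.com/Mister-Neko/python-works | sandwhich_maker.py | sandwich_total
-- ===== SOURCE A (Python) =====
-- def sandwich_total(num_sandwiches, sandwich, bread, protein, cheese):
--   ns = num_sandwiches
--   total = 0
--   for k in sandwich:
--     if k in bread:
--       total += bread[k]
--     elif k in protein:
--       total += protein[k]
--     elif k in cheese:
--       total += cheese[k]
--   total *= ns
--   return total
-- ===== SOURCE B (Python) =====
-- def sandwich_total(num_sandwiches, sandwich, bread, protein, cheese):
--     # Inverted traversal: tally the order's multiplicities once, then walk the three
--     # price tables, weighting each price by its multiplicity and skipping keys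
--     # shadowed by a higher-precedence table (bread > protein > cheese).
--     cnt = {}
--     for k in sandwich:
--         cnt[k] = cnt.get(k, 0) + 1
--     total = sum(v * cnt.get(k, 0) for k, v in bread.items())
--     total += sum(v * cnt.get(k, 0) for k, v in protein.items() if k not in bread)
--     total += sum(v * cnt.get(k, 0) for k, v in cheese.items()
--                  if k not in bread and k not in protein)
--     return total * num_sandwiches
-- ===== Notes on version B (the rewrite author's own statement) =====
-- stated objective: alternative
-- what changed: Inverts the traversal: instead of scanning the sandwich list and resolving each item through the bread/protein/cheese elif chain, B tallies the order's multiplicities in one counting pass and then iterates over the three price tables themselves, weighting each price by its multiplicity and filtering out keys shadowed by a higher-precedence table; correct because the summation can be regrouped by distinct ingredient key.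
import Mathlib
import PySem

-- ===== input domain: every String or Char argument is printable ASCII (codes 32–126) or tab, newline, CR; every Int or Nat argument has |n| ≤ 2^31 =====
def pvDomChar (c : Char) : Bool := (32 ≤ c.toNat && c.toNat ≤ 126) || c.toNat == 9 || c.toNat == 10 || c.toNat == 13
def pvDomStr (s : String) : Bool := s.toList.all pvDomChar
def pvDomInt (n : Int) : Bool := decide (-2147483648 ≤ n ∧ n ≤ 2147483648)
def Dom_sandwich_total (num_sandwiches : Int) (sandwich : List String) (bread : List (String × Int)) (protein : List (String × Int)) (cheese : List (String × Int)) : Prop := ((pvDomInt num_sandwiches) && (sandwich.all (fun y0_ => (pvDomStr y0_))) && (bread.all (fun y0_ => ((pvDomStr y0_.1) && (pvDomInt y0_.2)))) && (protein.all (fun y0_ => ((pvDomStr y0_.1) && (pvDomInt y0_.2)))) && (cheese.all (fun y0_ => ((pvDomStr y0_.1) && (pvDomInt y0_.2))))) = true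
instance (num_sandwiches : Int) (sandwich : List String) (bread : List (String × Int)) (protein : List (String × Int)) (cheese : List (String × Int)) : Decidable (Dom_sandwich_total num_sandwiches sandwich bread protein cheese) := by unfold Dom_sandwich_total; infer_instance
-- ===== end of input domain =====

-- B inverts the traversal: it walks the three price tables (not the sandwich list), weighting each
-- price by the item's multiplicity and skipping keys shadowed by a higher-precedence table.
-- ===== PORT A =====
def sandwich_total (num_sandwiches : Int) (sandwich : List String) (bread : List (String × Int)) (protein : List (String × Int)) (cheese : List (String × Int)) : Int :=
  let bd := PySem.Dict.ofList bread
  let pd := PySem.Dict.ofList protein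
  let cd := PySem.Dict.ofList cheese
  let ns := num_sandwiches
  let total := sandwich.foldl (fun total k =>
    if bd.contains k then total + bd.getD k 0
    else if pd.contains k then total + pd.getD k 0
    else if cd.contains k then total + cd.getD k 0
    else total) 0
  total * ns

-- ===== PORT B =====
def sandwich_total_alt (num_sandwiches : Int) (sandwich : List String) (bread : List (String × Int)) (protein : List (String × Int)) (cheese : List (String × Int)) : Int :=
  let bd := PySem.Dict.ofList bread
  let pd := PySem.Dict.ofList protein
  let cd := PySem.Dict.ofList cheese
  let cnt := sandwich.foldl (fun d k => d.insert k (d.getD k 0 + 1)) PySem.Dict.empty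
  let total := (bd.items.map (fun p => p.2 * cnt.getD p.1 0)).sum
  let total := total +
    ((pd.items.filter (fun p => !bd.contains p.1)).map (fun p => p.2 * cnt.getD p.1 0)).sum
  let total := total +
    ((cd.items.filter (fun p => !bd.contains p.1 && !pd.contains p.1)).map
      (fun p => p.2 * cnt.getD p.1 0)).sum
  total * num_sandwiches

-- ===== PRECONDITION & SPEC =====
def Spec_sandwich_total (num_sandwiches : Int) (sandwich : List String) (bread : List (String × Int)) (protein : List (String × Int)) (cheese : List (String × Int)) (out : Int) : Prop := out = sandwich_total_alt num_sandwiches sandwich bread protein cheese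
instance (num_sandwiches : Int) (sandwich : List String) (bread : List (String × Int)) (protein : List (String × Int)) (cheese : List (String × Int)) (out : Int) : Decidable (Spec_sandwich_total num_sandwiches sandwich bread protein cheese out) := by unfold Spec_sandwich_total; infer_instance

-- ===== CLAIM (what is proved, stated in full; the proofs are below) =====
def Claim_equal_sandwich_total : Prop := ∀ (num_sandwiches : Int) (sandwich : List String) (bread : List (String × Int)) (protein : List (String × Int)) (cheese : List (String × Int)), Dom_sandwich_total num_sandwiches sandwich bread protein cheese → Spec_sandwich_total num_sandwiches sandwich bread protein cheese (sandwich_total num_sandwiches sandwich bread protein cheese)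

-- ===== LEMMAS AND PROOFS =====

-- Sum of a filtered-then-mapped list as a sum of an ite-map over the whole list.
theorem sum_filter_map (l : List (String × Int)) (q : String × Int → Bool) (g : String × Int → Int) :
    ((l.filter q).map g).sum = (l.map (fun p => if q p then g p else 0)).sum := by
  induction l with
  | nil => simp
  | cons p ps ih =>
    by_cases h : q p = true <;> simp [h, ih]

-- A 0/1-weighted sum over a Nodup key list collapses to the single matching key's weight.
theorem key_delta (ks : List String) (hnd : ks.Nodup) (q : String → Bool) (w : String → Int) (x : String) :
    (ks.map (fun k => if q k then w k * (if k == x then (1:Int) else 0) else 0)).sum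
      = if decide (x ∈ ks) && q x then w x else 0 := by
  induction ks with
  | nil => simp
  | cons k ks ih =>
    rcases List.nodup_cons.mp hnd with ⟨hk, hnd'⟩
    rw [List.map_cons, List.sum_cons, ih hnd']
    by_cases hx : x = k
    · subst hx
      have h2 : decide (x ∈ ks) = false := by simp [hk]
      simp [h2]
    · have h1 : (k == x) = false := by
        simp only [beq_eq_false_iff_ne]; exact fun e => hx e.symm
      simp [h1, List.mem_cons, hx]

-- The 0/1-weighted sum over a dict's items is its lookup (guard q), for Nodup keys.
theorem table_delta (d : PySem.Dict String Int) (hnd : d.keys.Nodup) (q : String → Bool) (x : String) :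
    (d.items.map (fun p => if q p.1 then p.2 * (if p.1 == x then (1:Int) else 0) else 0)).sum
      = if d.contains x && q x then d.getD x 0 else 0 := by
  rw [PySem.Dict.items_eq_map_keys d hnd 0, List.map_map]
  rw [PySem.Dict.contains_eq_decide_mem_keys]
  exact key_delta d.keys hnd q (fun k => d.getD k 0) x

-- Python's count on a cons, cast to Int.
theorem count_cons_int (x : String) (xs : List String) (v : String) :
    ((PySem.List.count (x :: xs) v : Int)) = (PySem.List.count xs v : Int) + (if v == x then 1 else 0) := by
  rw [PySem.List.count_eq, PySem.List.count_eq, List.count_cons]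
  by_cases h : (v == x) = true
  · have hv : v = x := eq_of_beq h
    subst hv; simp
  · have hne : ¬ (x = v) := fun e => h (by simp [e])
    simp [h, hne]

-- The counting loop's table is Python's Counter: it looks up to the list's count.
theorem cnt_getD (sandwich : List String) (k : String) :
    (sandwich.foldl (fun d x => d.insert x (d.getD x 0 + 1)) PySem.Dict.empty).getD k 0
      = (PySem.List.count sandwich k : Int) := by
  rw [PySem.Dict.foldl_insert_getD_add_one_eq_counter, PySem.Dict.getD_counter, PySem.List.count_eq]

-- Regrouping: summing a table's prices weighted by multiplicities in xs equals summing,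
-- over xs, that table's price of each element (0 outside the table / the guard q).
theorem table_sum (d : PySem.Dict String Int) (hnd : d.keys.Nodup) (q : String → Bool) (xs : List String) :
    ((d.items.filter (fun p => q p.1)).map (fun p => p.2 * (PySem.List.count xs p.1 : Int))).sum
      = (xs.map (fun s => if d.contains s && q s then d.getD s 0 else 0)).sum := by
  induction xs with
  | nil =>
    simp [PySem.List.count_eq]
  | cons x xs ih =>
    have hsplit :
        ((d.items.filter (fun p => q p.1)).map (fun p => p.2 * (PySem.List.count (x :: xs) p.1 : Int))).sum
          = ((d.items.filter (fun p => q p.1)).map (fun p => p.2 * (PySem.List.count xs p.1 : Int))).sum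
            + ((d.items.filter (fun p => q p.1)).map (fun p => p.2 * (if p.1 == x then (1:Int) else 0))).sum := by
      rw [← PySem.List.sum_map_add_int]
      congr 1
      refine List.map_congr_left fun p _ => ?_
      rw [count_cons_int x xs p.1]; ring
    rw [hsplit, ih, List.map_cons, List.sum_cons]
    rw [sum_filter_map, table_delta d hnd q x]
    ring

-- A's loop body adds exactly the precedence price of each element.
theorem foldl_price (xs : List String) (bd pd cd : PySem.Dict String Int) (a : Int) :
    xs.foldl (fun total k =>
      if bd.contains k then total + bd.getD k 0
      else if pd.contains k then total + pd.getD k 0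
      else if cd.contains k then total + cd.getD k 0
      else total) a
    = a + (xs.map (fun k =>
        if bd.contains k then bd.getD k 0
        else if pd.contains k then pd.getD k 0
        else if cd.contains k then cd.getD k 0
        else 0)).sum := by
  rw [← PySem.List.foldl_add]
  congr 1
  funext total k
  split_ifs <;> ring

-- Pointwise split of the precedence price into the three guarded table prices.
theorem price_split (bd pd cd : PySem.Dict String Int) (k : String) :
    (if bd.contains k then bd.getD k 0
     else if pd.contains k then pd.getD k 0
     else if cd.contains k then cd.getD k 0
     else 0)
    = (if bd.contains k && true then bd.getD k 0 else 0)
      + (if pd.contains k && !bd.contains k then pd.getD k 0 else 0)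
      + (if cd.contains k && (!bd.contains k && !pd.contains k) then cd.getD k 0 else 0) := by
  cases hb : bd.contains k <;> cases hp : pd.contains k <;> cases hc : cd.contains k <;> simp

-- ===== VERDICT (by name: the statement is the Claim_ definition above) =====
theorem sandwich_total_spec : Claim_equal_sandwich_total := by
  intro ns sandwich bread protein cheese _
  unfold Spec_sandwich_total sandwich_total sandwich_total_alt
  simp only []
  congr 1
  simp only [cnt_getD]
  rw [foldl_price, zero_add]
  have hb := PySem.Dict.nodup_keys_ofList bread
  have hp := PySem.Dict.nodup_keys_ofList protein
  have hc := PySem.Dict.nodup_keys_ofList cheese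
  rw [table_sum (PySem.Dict.ofList protein) hp (fun k => !(PySem.Dict.ofList bread).contains k) sandwich]
  rw [table_sum (PySem.Dict.ofList cheese) hc
        (fun k => !(PySem.Dict.ofList bread).contains k && !(PySem.Dict.ofList protein).contains k) sandwich]
  have hbread :
      ((PySem.Dict.ofList bread).items.map (fun p => p.2 * (PySem.List.count sandwich p.1 : Int))).sum
        = (sandwich.map (fun s =>
            if (PySem.Dict.ofList bread).contains s && true then (PySem.Dict.ofList bread).getD s 0 else 0)).sum := by
    have h := table_sum (PySem.Dict.ofList bread) hb (fun _ => true) sandwich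
    simpa using h
  rw [hbread]
  rw [← PySem.List.sum_map_add_int, ← PySem.List.sum_map_add_int]
  congr 1
  exact List.map_congr_left fun k _ => price_split _ _ _ k
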